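-- pv_equiv track=rewrite | github.com/minjoong507/Algorithm_Study | BAEKJOON/Q_2447.py | makeblank
-- ===== SOURCE A (Python) =====
-- def makeblank(i, j):
--     di = i
--     dj = j
--     while di != 0:
--         if (di % 3) == 1 and (dj % 3) == 1:
--             return True
--         di = di // 3
--         dj = dj // 3
--     return False
-- ===== SOURCE B (Python) =====
-- def makeblank(i, j):
--     # Build i's base-3 digit list once, then scan it by index,
--     # reading j's k-th base-3 digit on demand.
--     digits = []
--     d = i
--     while d != 0:
--         digits.append(d % 3)
--         d //= 3
--     for k in range(len(digits)):
--         if digits[k] == 1 and (j // 3 ** k) % 3 == 1: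
--             return True
--     return False
-- ===== Notes on version B (the rewrite author's own statement) =====
-- stated objective: alternative
-- what changed: B replaces A's single loop that co-divides both i and j by a two-phase decomposition: it first materialises i's base-3 digit list, then scans it by index, reading j's k-th base-3 digit directly as (j // 3**k) % 3.
-- outside the precondition, e.g. on makeblank(-33, 4): A returns True, B does not finish within the time limit
import Mathlib
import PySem

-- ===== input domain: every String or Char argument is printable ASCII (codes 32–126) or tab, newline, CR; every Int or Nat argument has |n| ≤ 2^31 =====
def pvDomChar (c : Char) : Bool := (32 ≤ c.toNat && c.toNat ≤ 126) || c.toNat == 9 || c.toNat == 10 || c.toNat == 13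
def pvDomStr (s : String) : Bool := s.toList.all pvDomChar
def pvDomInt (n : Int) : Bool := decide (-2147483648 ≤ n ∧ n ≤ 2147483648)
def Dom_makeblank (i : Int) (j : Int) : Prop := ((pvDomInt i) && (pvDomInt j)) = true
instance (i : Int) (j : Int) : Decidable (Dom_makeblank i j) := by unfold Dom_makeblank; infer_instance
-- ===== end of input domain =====

-- B restructures A's co-dividing loop into two phases: build i's base-3 digit list, then an indexed scan
-- reading j's k-th base-3 digit on demand; objective: alternative decomposition (same cost).
-- A diverges for i < 0 (di//3 sticks at -1), hence Pre_ below; the loop variable di is carried as a Nat.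

-- ===== PORT A =====
-- A's while loop: di ≠ 0 → test digits, divide both by 3 (Python floor division).
def makeblankLoop (di : Nat) (dj : Int) : Bool :=
  if di = 0 then false
  else if di % 3 == 1 && PySem.Int.mod dj 3 == 1 then true
  else makeblankLoop (di / 3) (PySem.Int.floordiv dj 3)
decreasing_by exact Nat.div_lt_self (Nat.pos_of_ne_zero (by assumption)) (by omega)

-- guard only makes the loop total; behaviour is claimed under Pre_ (0 ≤ i) where it is exact
def makeblank (i : Int) (j : Int) : Bool :=
  if 0 ≤ i then makeblankLoop i.toNat j else false

-- ===== PORT B =====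
-- phase 1 of Source B: digits of i in base 3, least significant first
def digitsOf (d : Nat) : List Nat :=
  if d = 0 then []
  else d % 3 :: digitsOf (d / 3)
decreasing_by exact Nat.div_lt_self (Nat.pos_of_ne_zero (by assumption)) (by omega)

-- phase 2 of Source B: indexed scan, k is the running index
def scanDigits (ds : List Nat) (j : Int) (k : Nat) : Bool :=
  match ds with
  | [] => false
  | d :: rest =>
    if d == 1 && PySem.Int.mod (PySem.Int.floordiv j (3 ^ k)) 3 == 1 then true
    else scanDigits rest j (k + 1)

def makeblank_alt (i : Int) (j : Int) : Bool :=
  if 0 ≤ i then scanDigits (digitsOf i.toNat) j 0 else false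

-- ===== PRECONDITION & SPEC =====
-- Pre_ excludes i < 0: there A's while loop usually runs forever (di//3 sticks at -1), returning True only when
-- floor division on negatives happens to hit a digit pair of 1s; B's digit-building loop diverges on all i < 0.
def Pre_makeblank (i : Int) (j : Int) : Prop := 0 ≤ i
instance (i : Int) (j : Int) : Decidable (Pre_makeblank i j) := by unfold Pre_makeblank; infer_instance
def pvWitness_makeblank : Int × Int := (4, 4)

def Spec_makeblank (i : Int) (j : Int) (out : Bool) : Prop := out = makeblank_alt i j
instance (i : Int) (j : Int) (out : Bool) : Decidable (Spec_makeblank i j out) := by unfold Spec_makeblank; infer_instance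

-- ===== CLAIM (what is proved, stated in full; the proofs are below) =====
def Claim_equal_makeblank : Prop := ∀ (i : Int) (j : Int), Dom_makeblank i j → Pre_makeblank i j → Spec_makeblank i j (makeblank i j)

-- ===== LEMMAS AND PROOFS =====

-- Python floor division by positive divisors composes: (j // a) // b = j // (a*b)
lemma floordiv_floordiv (j : Int) (a b : Int) (ha : 0 < a) (hb : 0 < b) :
    PySem.Int.floordiv (PySem.Int.floordiv j a) b = PySem.Int.floordiv j (a * b) := by
  rw [PySem.Int.floordiv_eq_ediv_of_pos ha, PySem.Int.floordiv_eq_ediv_of_pos hb,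
      PySem.Int.floordiv_eq_ediv_of_pos (by positivity), Int.ediv_ediv_of_nonneg (le_of_lt ha)]

-- main invariant: A's loop on (di, j // 3^k) equals B's scan of di's digits with index k
lemma loop_eq_scan (di : Nat) : ∀ (j : Int) (k : Nat),
    makeblankLoop di (PySem.Int.floordiv j (3 ^ k)) = scanDigits (digitsOf di) j k := by
  induction di using Nat.strong_induction_on with
  | _ di ih =>
    intro j k
    by_cases h0 : di = 0
    · subst h0; rw [makeblankLoop, digitsOf]; simp [scanDigits]
    · rw [makeblankLoop, digitsOf, if_neg h0, if_neg h0]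
      simp only [scanDigits]
      have hdig : ((di % 3 : Nat) == 1) = (((di : Int) % 3) == 1) := by
        have h3 : ((di:Int) % 3) = ((di % 3 : Nat) : Int) := (Int.natCast_mod di 3).symm
        rw [h3]; simp; omega
      by_cases hc : (di % 3 == 1 && PySem.Int.mod (PySem.Int.floordiv j (3 ^ k)) 3 == 1) = true
      · rw [if_pos hc, if_pos hc]
      · rw [if_neg hc, if_neg hc]
        rw [floordiv_floordiv j (3 ^ k) 3 (by positivity) (by omega)]
        have : (3:Int) ^ k * 3 = 3 ^ (k + 1) := by ring
        rw [this]
        exact ih (di / 3) (Nat.div_lt_self (Nat.pos_of_ne_zero h0) (by omega)) j (k + 1)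

-- ===== VERDICT (by name: the statement is the Claim_ definition above) =====
theorem makeblank_spec : Claim_equal_makeblank := by
  intro i j _ hpre
  unfold Pre_makeblank at hpre
  unfold Spec_makeblank makeblank makeblank_alt
  rw [if_pos hpre, if_pos hpre]
  have := loop_eq_scan i.toNat j 0
  simpa [PySem.Int.floordiv] using this
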